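-- pv_equiv track=rewrite | github.com/doyoulackw/S-AES | s_aes.py | column_confuse
-- ===== SOURCE A (Python) =====
-- class GF24:
--     primitive = 0b10011
--
--     def __init__(self, value):
--         if isinstance(value, int) and 0 <= value <= 15:
--             self.value = value
--         elif isinstance(value, str):
--             if 0 <= int(value, 16) <= 15:
--                 self.value = int(value, 16)
--
--     def __add__(self, other):
--         return GF24(self.value ^ other.value)
--
--     def __mul__(self, other):
--         result = 0
--         value_1 = GF24(self.value)
--         value_2 = GF24(other.value)
--
--         for i in range(4):
--             if value_2.value & 1:
--                 result ^= value_1.value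
--             if value_1.value & 0b1000:
--                 value_1.value = (value_1.value << 1) ^ GF24.primitive
--             else:
--                 value_1.value <<= 1
--             value_2.value >>= 1
--         return GF24(result)
--
--     def __str__(self):
--         return str(self.value)
--
-- def column_confuse(list_s, box):
--     gf_s = [GF24(list_s[i]) for i in range(len(list_s))]
--     gf_b = [GF24(box[i]) for i in range(len(box))]
--
--     s = [0] * 4
--     s[0] = (gf_b[0] * gf_s[0] + gf_b[2] * gf_s[1]).value
--     s[1] = (gf_b[1] * gf_s[0] + gf_b[3] * gf_s[1]).value
--     s[2] = (gf_b[0] * gf_s[2] + gf_b[2] * gf_s[3]).value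
--     s[3] = (gf_b[1] * gf_s[2] + gf_b[3] * gf_s[3]).value
--     return s
-- ===== SOURCE B (Python) =====
-- def _mk_tables():
--     exp = []
--     x = 1
--     for _ in range(15):
--         exp.append(x)
--         x <<= 1
--         if x & 0x10:
--             x ^= 0b10011
--     log = {v: i for i, v in enumerate(exp)}
--     return exp, log
--
-- _EXP, _LOG = _mk_tables()
--
-- def _gmul(a, b):
--     if a == 0 or b == 0:
--         return 0
--     return _EXP[(_LOG[a] + _LOG[b]) % 15]
--
-- def column_confuse(list_s, box):
--     s0, s1, s2, s3 = list_s[:4]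
--     b0, b1, b2, b3 = box[:4]
--     return [_gmul(b0, s0) ^ _gmul(b2, s1),
--             _gmul(b1, s0) ^ _gmul(b3, s1),
--             _gmul(b0, s2) ^ _gmul(b2, s3),
--             _gmul(b1, s2) ^ _gmul(b3, s3)]
-- ===== Notes on version B (the rewrite author's own statement) =====
-- stated objective: alternative
-- what changed: Replaces the per-multiplication 4-step shift-and-reduce GF(2^4) loop by precomputed log/antilog tables (product = antilog[(log a + log b) % 15], 0 if an operand is 0), with the four mix-column dot products computed from the unpacked first four elements.
import Mathlib
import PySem

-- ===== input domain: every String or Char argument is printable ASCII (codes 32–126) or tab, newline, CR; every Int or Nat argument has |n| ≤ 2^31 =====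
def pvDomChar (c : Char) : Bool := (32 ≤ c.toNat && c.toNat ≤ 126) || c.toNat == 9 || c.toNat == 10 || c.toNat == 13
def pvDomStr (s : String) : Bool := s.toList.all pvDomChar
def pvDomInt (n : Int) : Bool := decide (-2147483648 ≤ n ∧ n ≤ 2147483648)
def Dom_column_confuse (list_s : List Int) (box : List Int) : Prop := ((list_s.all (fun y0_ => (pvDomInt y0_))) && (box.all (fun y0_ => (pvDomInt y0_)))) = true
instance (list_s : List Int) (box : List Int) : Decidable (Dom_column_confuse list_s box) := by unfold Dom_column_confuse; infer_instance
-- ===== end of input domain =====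

-- B replaces A's per-multiply 4-step shift-and-reduce GF(2^4) loop by precomputed
-- antilog/log tables (product = antilog[(log a + log b) % 15]); same return value on Pre_.

-- ===== PORT A =====
-- GF24.__init__ on an int: value set iff 0 <= v <= 15 (none = unset attribute -> AttributeError on use; excluded by Pre_)
def pvGF24Init (v : Int) : Option Int :=
  if 0 ≤ v ∧ v ≤ 15 then some v else none

-- GF24.__mul__: fold over range(4) with state (result, value_1, value_2)
def pvGF24Mul (a b : Int) : Int :=
  ((List.range 4).foldl (fun (st : Int × Int × Int) _ =>
      let r := if PySem.Int.band st.2.2 1 ≠ 0 then PySem.Int.bxor st.1 st.2.1 else st.1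
      let v1 := if PySem.Int.band st.2.1 8 ≠ 0 then PySem.Int.bxor (st.2.1 <<< 1) 19
                else st.2.1 <<< 1
      (r, v1, st.2.2 >>> 1)) (0, a, b)).1

-- list indexing of the GF24 lists; the getD defaults stand for IndexError / AttributeError,
-- both excluded by Pre_ (exact inside Pre_)
def pvAt (l : List (Option Int)) (i : Int) : Int :=
  ((PySem.List.pyGet? l i).getD none).getD 0

def column_confuse (list_s : List Int) (box : List Int) : List Int :=
  let gf_s := list_s.map pvGF24Init
  let gf_b := box.map pvGF24Init
  [ PySem.Int.bxor (pvGF24Mul (pvAt gf_b 0) (pvAt gf_s 0)) (pvGF24Mul (pvAt gf_b 2) (pvAt gf_s 1)),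
    PySem.Int.bxor (pvGF24Mul (pvAt gf_b 1) (pvAt gf_s 0)) (pvGF24Mul (pvAt gf_b 3) (pvAt gf_s 1)),
    PySem.Int.bxor (pvGF24Mul (pvAt gf_b 0) (pvAt gf_s 2)) (pvGF24Mul (pvAt gf_b 2) (pvAt gf_s 3)),
    PySem.Int.bxor (pvGF24Mul (pvAt gf_b 1) (pvAt gf_s 2)) (pvGF24Mul (pvAt gf_b 3) (pvAt gf_s 3)) ]

-- ===== PORT B =====
-- antilog table: 15 powers of the generator 2 modulo 0b10011 (Source B's _mk_tables loop)
def pvExp : List Int :=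
  ((List.range 15).foldl (fun (st : List Int × Int) _ =>
      (st.1 ++ [st.2],
       if PySem.Int.band (st.2 <<< 1) 16 ≠ 0 then PySem.Int.bxor (st.2 <<< 1) 19
       else st.2 <<< 1)) ([], 1)).1

-- log table: {v: i for i, v in enumerate(exp)}
def pvLog : PySem.Dict Int Int :=
  PySem.Dict.ofList ((PySem.List.enumerate pvExp).map (fun p => (p.2, p.1)))

-- _gmul; the getD defaults stand for KeyError on operands outside 1..15 (excluded by Pre_)
def pvGmul (a b : Int) : Int :=
  if a = 0 ∨ b = 0 then 0
  else (PySem.List.pyGet? pvExp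
          (PySem.Int.mod (pvLog.getD a 0 + pvLog.getD b 0) 15)).getD 0

def column_confuse_alt (list_s : List Int) (box : List Int) : List Int :=
  match PySem.List.slice list_s none (some 4), PySem.List.slice box none (some 4) with
  | [s0, s1, s2, s3], [b0, b1, b2, b3] =>
    [ PySem.Int.bxor (pvGmul b0 s0) (pvGmul b2 s1),
      PySem.Int.bxor (pvGmul b1 s0) (pvGmul b3 s1),
      PySem.Int.bxor (pvGmul b0 s2) (pvGmul b2 s3),
      PySem.Int.bxor (pvGmul b1 s2) (pvGmul b3 s3) ]
  | _, _ => []  -- Python's tuple unpack raises ValueError here; outside Pre_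

-- ===== PRECONDITION & SPEC =====
-- Pre_: exactly where A returns — both lists have length ≥ 4 (else IndexError) and the four
-- used elements of each lie in 0..15 (else GF24 leaves .value unset -> AttributeError).
def Pre_column_confuse (list_s : List Int) (box : List Int) : Prop :=
  4 ≤ list_s.length ∧ 4 ≤ box.length ∧
  (∀ x ∈ list_s.take 4, 0 ≤ x ∧ x ≤ 15) ∧ (∀ x ∈ box.take 4, 0 ≤ x ∧ x ≤ 15)
instance (list_s : List Int) (box : List Int) : Decidable (Pre_column_confuse list_s box) := by
  unfold Pre_column_confuse; infer_instance

def pvWitness_column_confuse : List Int × List Int := ([9, 12, 6, 3], [1, 4, 4, 1])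

def Spec_column_confuse (list_s : List Int) (box : List Int) (out : List Int) : Prop := out = column_confuse_alt list_s box
instance (list_s : List Int) (box : List Int) (out : List Int) : Decidable (Spec_column_confuse list_s box out) := by unfold Spec_column_confuse; infer_instance

-- ===== CLAIM (what is proved, stated in full; the proofs are below) =====
def Claim_equal_column_confuse : Prop := ∀ (list_s : List Int) (box : List Int), Dom_column_confuse list_s box → Pre_column_confuse list_s box → Spec_column_confuse list_s box (column_confuse list_s box)

-- ===== LEMMAS AND PROOFS =====

-- the two multiplies agree on the GF(2^4) domain 0..15
lemma pvMul_eq (a b : Int) (ha0 : 0 ≤ a) (ha : a ≤ 15) (hb0 : 0 ≤ b) (hb : b ≤ 15) :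
    pvGF24Mul a b = pvGmul a b := by
  interval_cases a <;> interval_cases b <;> decide

-- ===== VERDICT (by name: the statement is the Claim_ definition above) =====
theorem column_confuse_spec : Claim_equal_column_confuse := by
  intro list_s box _ hpre
  obtain ⟨hl, hb, hls, hbs⟩ := hpre
  match list_s, box with
  | s0 :: s1 :: s2 :: s3 :: t, b0 :: b1 :: b2 :: b3 :: u =>
    simp only [List.take, List.mem_cons, List.not_mem_nil, or_false, forall_eq_or_imp,
      forall_eq] at hls hbs
    obtain ⟨⟨hs0, hs0'⟩, ⟨hs1, hs1'⟩, ⟨hs2, hs2'⟩, ⟨hs3, hs3'⟩⟩ := hls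
    obtain ⟨⟨hb0, hb0'⟩, ⟨hb1, hb1'⟩, ⟨hb2, hb2'⟩, ⟨hb3, hb3'⟩⟩ := hbs
    show Spec_column_confuse _ _ _
    show Spec_column_confuse _ _ _
    have eA : column_confuse (s0::s1::s2::s3::t) (b0::b1::b2::b3::u) =
        [ PySem.Int.bxor (pvGF24Mul b0 s0) (pvGF24Mul b2 s1),
          PySem.Int.bxor (pvGF24Mul b1 s0) (pvGF24Mul b3 s1),
          PySem.Int.bxor (pvGF24Mul b0 s2) (pvGF24Mul b2 s3),
          PySem.Int.bxor (pvGF24Mul b1 s2) (pvGF24Mul b3 s3) ] := by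
      simp [column_confuse, pvAt, pvGF24Init, pysem,
        hs0, hs0', hs1, hs1', hs2, hs2', hs3, hs3', hb0, hb0', hb1, hb1', hb2, hb2', hb3, hb3']
    have eB : column_confuse_alt (s0::s1::s2::s3::t) (b0::b1::b2::b3::u) =
        [ PySem.Int.bxor (pvGmul b0 s0) (pvGmul b2 s1),
          PySem.Int.bxor (pvGmul b1 s0) (pvGmul b3 s1),
          PySem.Int.bxor (pvGmul b0 s2) (pvGmul b2 s3),
          PySem.Int.bxor (pvGmul b1 s2) (pvGmul b3 s3) ] := by
      unfold column_confuse_alt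
      rw [show ((4 : Int)) = ((4 : Nat) : Int) by norm_num,
          PySem.List.slice_to_natCast, PySem.List.slice_to_natCast]
      simp
    unfold Spec_column_confuse
    rw [eA, eB,
        pvMul_eq b0 s0 hb0 hb0' hs0 hs0', pvMul_eq b2 s1 hb2 hb2' hs1 hs1',
        pvMul_eq b1 s0 hb1 hb1' hs0 hs0', pvMul_eq b3 s1 hb3 hb3' hs1 hs1',
        pvMul_eq b0 s2 hb0 hb0' hs2 hs2', pvMul_eq b2 s3 hb2 hb2' hs3 hs3',
        pvMul_eq b1 s2 hb1 hb1' hs2 hs2', pvMul_eq b3 s3 hb3 hb3' hs3 hs3']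
  | [], _ => simp at hl
  | [_], _ => simp at hl
  | [_, _], _ => simp at hl
  | [_, _, _], _ => simp at hl
  | _, [] => simp at hb
  | _, [_] => simp at hb
  | _, [_, _] => simp at hb
  | _, [_, _, _] => simp at hb
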